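-- pv_equiv track=rewrite | github.com/flowerchar/city_info | CCF_CAT_AL/ccf1.py | pass_the_flower
-- ===== SOURCE A (Python) =====
-- def pass_the_flower(n, s):
--     """
--     计算s秒后拿着花的人的编号
--
--     :param n: 人数
--     :param s: 秒数
--     :return: s秒后拿着花的人的编号
--     """
--     # 初始位置在队首
--     position = 1
--     # 初始方向为向右（1表示向右，-1表示向左）
--     direction = 1
--
--     # 每秒钟更新花的位置
--     for _ in range(s):
--         # 更新位置
--         position += direction
--
--         # 如果到达队首或队尾，改变方向
--         if position == 1:
--             direction = 1  # 向右传递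
--         elif position == n:
--             direction = -1  # 向左传递
--
--     return position
-- ===== SOURCE B (Python) =====
-- def pass_the_flower(n, s):
--     # Closed-form triangle wave: position after s seconds has period 2*(n-1).
--     if s <= 0 or n <= 1:
--         return 1
--     r = s % (2 * (n - 1))
--     return 1 + r if r < n else 2 * n - 1 - r
-- ===== Notes on version B (the rewrite author's own statement) =====
-- stated objective: faster
-- what changed: Replaced the second-by-second bounce simulation loop with a closed-form triangle-wave formula on s mod 2*(n-1).
-- intended difference: For n <= 1 and s >= 1 A's bounce check never fires and it returns s+1, a position that does not exist; B returns 1, the only possible holder (or the leftmost for degenerate n<=0). — e.g. on pass_the_flower(1, 3): A returns 4, B returns 1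
import Mathlib
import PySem

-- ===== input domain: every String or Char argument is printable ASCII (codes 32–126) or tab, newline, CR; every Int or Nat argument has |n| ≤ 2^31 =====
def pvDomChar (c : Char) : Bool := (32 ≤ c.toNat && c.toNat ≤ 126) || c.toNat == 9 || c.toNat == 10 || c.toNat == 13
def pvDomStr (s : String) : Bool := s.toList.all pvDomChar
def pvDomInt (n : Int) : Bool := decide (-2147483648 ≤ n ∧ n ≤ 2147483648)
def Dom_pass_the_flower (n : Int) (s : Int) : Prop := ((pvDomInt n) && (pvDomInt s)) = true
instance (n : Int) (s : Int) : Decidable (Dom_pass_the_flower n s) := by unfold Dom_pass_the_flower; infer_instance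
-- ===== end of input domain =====

-- B replaces A's O(s) bounce-simulation loop with the O(1) closed-form triangle wave on s mod 2(n-1).

-- ===== PORT A =====
-- the body of A's for-loop: position += direction, then reflect at 1 and at n
def ptfStep (n : Int) (st : Int × Int) (_ : Int) : Int × Int :=
  let p := st.1 + st.2
  if p = 1 then (p, 1)
  else if p = n then (p, -1)
  else (p, st.2)

def pass_the_flower (n : Int) (s : Int) : Int :=
  ((PySem.List.pyRange 0 s 1).foldl (ptfStep n) (1, 1)).1

-- ===== PORT B =====
def pass_the_flower_alt (n : Int) (s : Int) : Int :=
  if s ≤ 0 ∨ n ≤ 1 then 1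
  else
    let r := PySem.Int.mod s (2 * (n - 1))
    if r < n then 1 + r else 2 * n - 1 - r

-- ===== PRECONDITION & SPEC =====
-- For n ≤ 1 and s ≥ 1, A's reflection at position n never fires, so A returns s+1 — a
-- position that does not exist among n people; B returns 1, the only possible holder.
def D_pass_the_flower (n : Int) (s : Int) : Prop := n ≤ 1 ∧ 1 ≤ s
instance (n : Int) (s : Int) : Decidable (D_pass_the_flower n s) := by unfold D_pass_the_flower; infer_instance

def Spec_pass_the_flower (n : Int) (s : Int) (out : Int) : Prop :=
  ¬ D_pass_the_flower n s → out = pass_the_flower_alt n s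
instance (n : Int) (s : Int) (out : Int) : Decidable (Spec_pass_the_flower n s out) := by unfold Spec_pass_the_flower; infer_instance

def pvDiffWitness_pass_the_flower : Int × Int := (1, 3)
def pvDiffWitnessOut_pass_the_flower : Int × Int := (4, 1)

-- ===== CLAIM (what is proved, stated in full; the proofs are below) =====
def Claim_unchanged_pass_the_flower : Prop := ∀ (n : Int) (s : Int), Dom_pass_the_flower n s → Spec_pass_the_flower n s (pass_the_flower n s)
def Claim_changed_pass_the_flower : Prop := Dom_pass_the_flower (pvDiffWitness_pass_the_flower.1) (pvDiffWitness_pass_the_flower.2) ∧ D_pass_the_flower (pvDiffWitness_pass_the_flower.1) (pvDiffWitness_pass_the_flower.2) ∧ pass_the_flower (pvDiffWitness_pass_the_flower.1) (pvDiffWitness_pass_the_flower.2) = pvDiffWitnessOut_pass_the_flower.1 ∧ pass_the_flower_alt (pvDiffWitness_pass_the_flower.1) (pvDiffWitness_pass_the_flower.2) = pvDiffWitnessOut_pass_the_flower.2 ∧ pvDiffWitnessOut_pass_the_flower.1 ≠ pvDiffWitnessOut_pass_the_flower.2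
def Claim_exact_pass_the_flower : Prop := ∀ (n : Int) (s : Int), Dom_pass_the_flower n s → D_pass_the_flower n s → pass_the_flower n s ≠ pass_the_flower_alt n s

-- ===== LEMMAS AND PROOFS =====

-- With n ≤ 1 the branch `p = n` can only fire at p = 1 first, so the direction stays 1
-- and the position just counts up: after k steps it is 1 + k.
lemma ptf_loop_low (n : Int) (hn : n ≤ 1) : ∀ k : Nat,
    (PySem.List.pyRange 0 (k : Int) 1).foldl (ptfStep n) (1, 1) = (1 + (k : Int), 1) := by
  intro k
  induction k with
  | zero => simp [PySem.List.pyRange]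
  | succ k ih =>
      have h : ((k : Int) + 1) = ((k + 1 : Nat) : Int) := by push_cast; ring
      rw [← h, PySem.List.pyRange_one_succ_right (a := 0) (b := (k:Int)) (by positivity), List.foldl_append, ih]
      simp only [List.foldl, ptfStep]
      have h1 : ¬ (1 + (k : Int) + 1 = 1) := by omega
      have h2 : ¬ (1 + (k : Int) + 1 = n) := by omega
      simp [h1, h2]
      ring

-- One step of A's loop, characterised on the triangle-wave state: if the current state is
-- the wave at phase r, the next state is the wave at phase r' = (r+1) mod 2(n-1).
lemma ptf_step_char (n : Int) (hn : 2 ≤ n) (r r' x : Int) (hr : 0 ≤ r) (hrm : r < 2 * (n - 1))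
    (h' : r' = if r + 1 < 2 * (n - 1) then r + 1 else 0) :
    ptfStep n ((if r < n then 1 + r else 2 * n - 1 - r), (if r ≤ n - 2 then 1 else -1)) x =
      ((if r' < n then 1 + r' else 2 * n - 1 - r'), (if r' ≤ n - 2 then 1 else -1)) := by
  subst h'
  simp only [ptfStep]
  split_ifs <;> simp only [Prod.mk.injEq, and_true] <;> first | trivial | omega

-- Loop invariant for n ≥ 2: after k steps the state is the triangle wave of r = k mod 2(n-1)
-- (position) together with the current direction.
lemma ptf_loop (n : Int) (hn : 2 ≤ n) : ∀ k : Nat,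
    (PySem.List.pyRange 0 (k : Int) 1).foldl (ptfStep n) (1, 1) =
      ((if (k : Int) % (2 * (n - 1)) < n then 1 + (k : Int) % (2 * (n - 1))
        else 2 * n - 1 - (k : Int) % (2 * (n - 1))),
       (if (k : Int) % (2 * (n - 1)) ≤ n - 2 then 1 else -1)) := by
  intro k
  have hmpos : 0 < 2 * (n - 1) := by omega
  induction k with
  | zero =>
      have h0 : ((0 : Nat) : Int) % (2 * (n - 1)) = 0 := by simp
      rw [h0]
      simp [PySem.List.pyRange]
      omega
  | succ k ih =>
      have hcast : ((k : Int) + 1) = ((k + 1 : Nat) : Int) := by push_cast; ring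
      rw [← hcast, PySem.List.pyRange_one_succ_right (a := 0) (b := (k : Int)) (by positivity),
        List.foldl_append, ih]
      have hr0 : 0 ≤ (k : Int) % (2 * (n - 1)) := Int.emod_nonneg _ (by omega)
      have hrm : (k : Int) % (2 * (n - 1)) < 2 * (n - 1) := Int.emod_lt_of_pos _ hmpos
      have hstep : ((k + 1 : Nat) : Int) % (2 * (n - 1)) =
          if (k : Int) % (2 * (n - 1)) + 1 < 2 * (n - 1) then (k : Int) % (2 * (n - 1)) + 1
          else 0 := by
        have h1 : ((k + 1 : Nat) : Int) % (2 * (n - 1)) =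
            ((k : Int) % (2 * (n - 1)) + 1) % (2 * (n - 1)) := by
          push_cast
          conv_lhs => rw [Int.add_emod]
          rw [show (1 : Int) % (2 * (n - 1)) = 1 from Int.emod_eq_of_lt (by omega) (by omega)]
        rw [h1]
        split_ifs with h
        · exact Int.emod_eq_of_lt (by omega) h
        · rw [show (k : Int) % (2 * (n - 1)) + 1 = 2 * (n - 1) by omega]
          simp
      simp only [List.foldl]
      exact ptf_step_char n hn _ _ _ hr0 hrm hstep

lemma ptf_closed (n s : Int) (hn : 2 ≤ n) (hs : 0 ≤ s) :
    pass_the_flower n s =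
      (if s % (2 * (n - 1)) < n then 1 + s % (2 * (n - 1)) else 2 * n - 1 - s % (2 * (n - 1))) := by
  have hcast : s = ((s.toNat : Nat) : Int) := by omega
  rw [pass_the_flower, hcast, ptf_loop n hn s.toNat]

lemma ptf_neg (n s : Int) (hs : s ≤ 0) : pass_the_flower n s = 1 := by
  simp [pass_the_flower, PySem.List.pyRange_one, Int.toNat_of_nonpos hs]

-- ===== VERDICT (by name: the statement is the Claim_ definition above) =====
theorem pass_the_flower_spec : Claim_unchanged_pass_the_flower := by
  intro n s _ hD
  unfold D_pass_the_flower at hD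
  rw [pass_the_flower_alt]
  rcases (by omega : s ≤ 0 ∨ 0 < s) with hs | hs
  · rw [ptf_neg n s hs]; simp [hs]
  · have hn : 2 ≤ n := by
      rcases (by omega : n ≤ 1 ∨ 2 ≤ n) with h | h
      · exact absurd ⟨h, by omega⟩ hD
      · exact h
    have hmod : PySem.Int.mod s (2 * (n - 1)) = s % (2 * (n - 1)) :=
      PySem.Int.mod_eq_emod_of_pos (by omega)
    rw [ptf_closed n s hn (by omega)]
    simp only [hmod]
    simp [show ¬ (s ≤ 0 ∨ n ≤ 1) by omega]

theorem pass_the_flower_changed : Claim_changed_pass_the_flower := by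
  unfold Claim_changed_pass_the_flower; decide

theorem pass_the_flower_tight : Claim_exact_pass_the_flower := by
  intro n s _ hD
  obtain ⟨hn, hs⟩ := hD
  have hcast : s = ((s.toNat : Nat) : Int) := by omega
  have hA : pass_the_flower n s = 1 + (s.toNat : Int) := by
    rw [pass_the_flower, hcast, ptf_loop_low n hn s.toNat]
    simp
  have hB : pass_the_flower_alt n s = 1 := by
    rw [pass_the_flower_alt]; simp [hn]
  rw [hA, hB]
  omega
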